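-- pv_equiv track=rewrite | github.com/sebmonte/Orientation-Imagery | AnalysisScripts/Step3-CrossDecoding/Step3CSlidingWindowScript.py | find_contacting_movies_and_samples
-- ===== SOURCE A (Python) =====
-- def find_contacting_movies_and_samples(input_number, movies):
--     """This function looks, for each orientation, which movies pass through it and at what time in samples they do so
-- #Note: This intentionally excludes instances when an orientation appears right at the beginning of a movie from its list,
-- since we do not want to include decoding for the first frame to appear as this is different from the rest (still-still)"""
--     def normalize_frame(frame):
--         #Normalize frame to be within 0 to 359.
--         return frame % 360
--
--     def frames_contact(movie_start, input_number):
--         #Check if a movie intersects the input number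
--         right_frames = [(movie_start + i) % 360 for i in range(181)]
--         left_frames = [(movie_start - i) % 360 for i in range(181)]
--         left_frames = [normalize_frame(f) for f in left_frames]
--
--         return input_number in right_frames, input_number in left_frames
--
--     def calculate_sample_time(movie_start, input_number, direction):
--         #Calculate the sample time at which the movie passes through the input number
--         if direction == "Right":
--             frame_difference = (input_number - movie_start) % 360
--         else:  # direction == "Left"
--             frame_difference = (movie_start - input_number) % 360
--
--         if frame_difference == 0:
--             return 60
--         else:
--             return 60 + frame_difference * 20
--
--     result = {}
--     for movie_start in movies:
--         right_contacts, left_contacts = frames_contact(movie_start, input_number)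
--
--         if right_contacts:
--             if movie_start < 100: #Ensure correct naming, movies less than 100 have two zeros in front of them in condition name
--                 movie_name = f"00{movie_start}_Right"
--             else:
--                 movie_name = f"0{movie_start}_Right"
--             sample_time = calculate_sample_time(movie_start, input_number, "Right") + 240
--             if sample_time < 400:
--                 continue  # skip this movie
--             result[movie_name] = sample_time
--
--         if left_contacts:
--             if movie_start < 100:
--                 movie_name = f"00{movie_start}_Left"
--             else:
--                 movie_name = f"0{movie_start}_Left"
--             sample_time = calculate_sample_time(movie_start, input_number, "Left") + 240
--             if sample_time < 400:
--                 continue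
--             result[movie_name] = sample_time
--
--     return result
-- ===== SOURCE B (Python) =====
-- def find_contacting_movies_and_samples(input_number, movies):
--     """Arithmetic re-implementation: modular distances instead of 181-element frame lists."""
--     result = {}
--     if not (0 <= input_number < 360):
--         return result  # input_number can never appear in the normalized frame lists
--     for movie_start in movies:
--         prefix = "00" if movie_start < 100 else "0"
--         r = (input_number - movie_start) % 360
--         if r <= 180:
--             if r < 5:
--                 continue  # sample time would be < 400; left branch is skipped too
--             result[f"{prefix}{movie_start}_Right"] = 300 + 20 * r
--         l = (movie_start - input_number) % 360
--         if 5 <= l <= 180: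
--             result[f"{prefix}{movie_start}_Left"] = 300 + 20 * l
--     return result
-- ===== Notes on version B (the rewrite author's own statement) =====
-- stated objective: simpler
-- what changed: B replaces the two 181-element frame-list constructions and linear membership scans per movie by direct modular arithmetic (r=(input-start)%360, l=(start-input)%360 with contact iff <=180) plus one early return when input_number is outside 0..359, reusing r/l directly as sample times.
import Mathlib
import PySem

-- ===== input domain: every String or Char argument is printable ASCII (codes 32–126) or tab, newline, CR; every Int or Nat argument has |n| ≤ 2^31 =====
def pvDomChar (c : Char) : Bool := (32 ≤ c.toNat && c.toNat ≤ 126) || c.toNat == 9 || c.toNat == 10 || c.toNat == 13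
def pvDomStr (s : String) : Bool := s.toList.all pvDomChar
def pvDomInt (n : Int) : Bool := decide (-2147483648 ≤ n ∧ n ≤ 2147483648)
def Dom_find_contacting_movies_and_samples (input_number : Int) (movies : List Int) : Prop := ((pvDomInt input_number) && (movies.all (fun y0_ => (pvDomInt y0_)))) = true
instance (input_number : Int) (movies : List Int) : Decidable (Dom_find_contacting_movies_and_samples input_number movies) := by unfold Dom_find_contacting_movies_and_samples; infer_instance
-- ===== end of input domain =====

-- B replaces the per-movie 181-element frame lists and membership scans by direct modular arithmetic; objective: simpler.

-- ===== PORT A =====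
def pvNormalizeFrame (frame : Int) : Int := PySem.Int.mod frame 360

def pvFramesContact (movie_start input_number : Int) : Bool × Bool :=
  let right_frames := (PySem.List.pyRange 0 181 1).map (fun i => PySem.Int.mod (movie_start + i) 360)
  let left_frames0 := (PySem.List.pyRange 0 181 1).map (fun i => PySem.Int.mod (movie_start - i) 360)
  let left_frames := left_frames0.map pvNormalizeFrame
  (right_frames.contains input_number, left_frames.contains input_number)

def pvCalcSampleTime (movie_start input_number : Int) (direction : String) : Int :=
  let frame_difference :=
    if direction = "Right" then PySem.Int.mod (input_number - movie_start) 360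
    else PySem.Int.mod (movie_start - input_number) 360
  if frame_difference = 0 then 60 else 60 + frame_difference * 20

-- the Left block of A's loop body (reached unless the Right block executed `continue`)
def pvLeftStepA (input_number movie_start : Int) (result : PySem.Dict String Int) : PySem.Dict String Int :=
  if (pvFramesContact movie_start input_number).2 then
    let movie_name := (if movie_start < 100 then "00" else "0") ++ PySem.Int.toStr movie_start ++ "_Left"
    let sample_time := pvCalcSampleTime movie_start input_number "Left" + 240
    if sample_time < 400 then result else result.insert movie_name sample_time
  else result

def pvBodyA (input_number : Int) (result : PySem.Dict String Int) (movie_start : Int) : PySem.Dict String Int :=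
  if (pvFramesContact movie_start input_number).1 then
    let movie_name := (if movie_start < 100 then "00" else "0") ++ PySem.Int.toStr movie_start ++ "_Right"
    let sample_time := pvCalcSampleTime movie_start input_number "Right" + 240
    if sample_time < 400 then result   -- `continue`: the Left block is skipped too
    else pvLeftStepA input_number movie_start (result.insert movie_name sample_time)
  else pvLeftStepA input_number movie_start result

def find_contacting_movies_and_samples (input_number : Int) (movies : List Int) : List (String × Int) :=
  (movies.foldl (pvBodyA input_number) PySem.Dict.empty).items

-- ===== PORT B =====
def pvBodyB (input_number : Int) (result : PySem.Dict String Int) (movie_start : Int) : PySem.Dict String Int :=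
  let pfx := if movie_start < 100 then "00" else "0"
  let r := PySem.Int.mod (input_number - movie_start) 360
  if r ≤ 180 ∧ r < 5 then result   -- `continue`
  else
    let result := if r ≤ 180 then result.insert (pfx ++ PySem.Int.toStr movie_start ++ "_Right") (300 + 20 * r) else result
    let l := PySem.Int.mod (movie_start - input_number) 360
    if 5 ≤ l ∧ l ≤ 180 then result.insert (pfx ++ PySem.Int.toStr movie_start ++ "_Left") (300 + 20 * l) else result

def find_contacting_movies_and_samples_alt (input_number : Int) (movies : List Int) : List (String × Int) :=
  if ¬ (0 ≤ input_number ∧ input_number < 360) then []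
  else (movies.foldl (pvBodyB input_number) PySem.Dict.empty).items

-- ===== PRECONDITION & SPEC =====
def Spec_find_contacting_movies_and_samples (input_number : Int) (movies : List Int) (out : List (String × Int)) : Prop := out = find_contacting_movies_and_samples_alt input_number movies
instance (input_number : Int) (movies : List Int) (out : List (String × Int)) : Decidable (Spec_find_contacting_movies_and_samples input_number movies out) := by unfold Spec_find_contacting_movies_and_samples; infer_instance

-- ===== CLAIM (what is proved, stated in full; the proofs are below) =====
def Claim_equal_find_contacting_movies_and_samples : Prop := ∀ (input_number : Int) (movies : List Int), Dom_find_contacting_movies_and_samples input_number movies → Spec_find_contacting_movies_and_samples input_number movies (find_contacting_movies_and_samples input_number movies)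

-- ===== LEMMAS AND PROOFS =====

theorem pvmod360 (a : Int) : PySem.Int.mod a 360 = a % 360 :=
  PySem.Int.mod_eq_emod_of_pos (by norm_num)

theorem pvContact_right (m x : Int) :
    (pvFramesContact m x).1 = true ↔ (0 ≤ x ∧ x < 360 ∧ (x - m) % 360 ≤ 180) := by
  simp only [pvFramesContact, List.contains_iff_mem, List.mem_map,
    PySem.List.mem_pyRange_one, pvmod360]
  constructor
  · rintro ⟨i, ⟨h0, h1⟩, rfl⟩
    refine ⟨by omega, by omega, by omega⟩
  · rintro ⟨h0, h1, h2⟩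
    exact ⟨(x - m) % 360, by omega, by omega⟩

theorem pvContact_left (m x : Int) :
    (pvFramesContact m x).2 = true ↔ (0 ≤ x ∧ x < 360 ∧ (m - x) % 360 ≤ 180) := by
  simp only [pvFramesContact, List.contains_iff_mem, List.mem_map,
    PySem.List.mem_pyRange_one, pvmod360, pvNormalizeFrame]
  constructor
  · rintro ⟨y, ⟨i, ⟨h0, h1⟩, rfl⟩, rfl⟩
    refine ⟨by omega, by omega, by omega⟩
  · rintro ⟨h0, h1, h2⟩
    exact ⟨(m - (m - x) % 360) % 360, ⟨(m - x) % 360, ⟨by omega, by omega⟩, rfl⟩, by omega⟩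

theorem pvContact_right_iff (m x : Int) (hx0 : 0 ≤ x) (hx1 : x < 360) :
    ((pvFramesContact m x).1 = true) ↔ (x - m) % 360 ≤ 180 := by
  rw [pvContact_right]; omega

theorem pvContact_left_iff (m x : Int) (hx0 : 0 ≤ x) (hx1 : x < 360) :
    ((pvFramesContact m x).2 = true) ↔ (m - x) % 360 ≤ 180 := by
  rw [pvContact_left]; omega

theorem pvBody_skip (x : Int) (hx : ¬ (0 ≤ x ∧ x < 360)) (res : PySem.Dict String Int) (m : Int) :
    pvBodyA x res m = res := by
  have hr : (pvFramesContact m x).1 = false := by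
    cases h : (pvFramesContact m x).1
    · rfl
    · exact absurd ((pvContact_right m x).1 h) (by tauto)
  have hl : (pvFramesContact m x).2 = false := by
    cases h : (pvFramesContact m x).2
    · rfl
    · exact absurd ((pvContact_left m x).1 h) (by tauto)
  simp [pvBodyA, pvLeftStepA, hr, hl]

theorem pvBody_eq (x : Int) (hx0 : 0 ≤ x) (hx1 : x < 360) (res : PySem.Dict String Int) (m : Int) :
    pvBodyA x res m = pvBodyB x res m := by
  have hc1 := pvContact_right_iff m x hx0 hx1
  have hc2 := pvContact_left_iff m x hx0 hx1
  simp only [pvBodyA, pvBodyB, pvLeftStepA, pvCalcSampleTime, pvmod360, hc1, hc2,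
    reduceIte, String.reduceEq]
  split_ifs <;> first
    | rfl
    | omega
    | (congr 1 <;> omega)
    | (congr 1 <;> [(congr 1 <;> omega); omega])

theorem pvFoldl_eq (x : Int) (hx0 : 0 ≤ x) (hx1 : x < 360) (ms : List Int)
    (res : PySem.Dict String Int) :
    ms.foldl (pvBodyA x) res = ms.foldl (pvBodyB x) res := by
  induction ms generalizing res with
  | nil => rfl
  | cons m ms ih => rw [List.foldl_cons, List.foldl_cons, pvBody_eq x hx0 hx1, ih]

theorem pvFoldl_skip (x : Int) (hx : ¬ (0 ≤ x ∧ x < 360)) (ms : List Int)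
    (res : PySem.Dict String Int) :
    ms.foldl (pvBodyA x) res = res := by
  induction ms generalizing res with
  | nil => rfl
  | cons m ms ih => rw [List.foldl_cons, pvBody_skip x hx res m, ih]

-- ===== VERDICT (by name: the statement is the Claim_ definition above) =====
theorem find_contacting_movies_and_samples_spec : Claim_equal_find_contacting_movies_and_samples := by
  intro x movies _
  unfold Spec_find_contacting_movies_and_samples
  unfold find_contacting_movies_and_samples find_contacting_movies_and_samples_alt
  by_cases hx : 0 ≤ x ∧ x < 360
  · rw [if_neg (by tauto), pvFoldl_eq x hx.1 hx.2]
  · rw [if_pos hx, pvFoldl_skip x hx]; rfl
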